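-- pv_equiv track=rewrite | github.com/pypi-data/pypi-mirror-398 | packages/justhtml/justhtml-0.17.0.tar.gz/justhtml-0.17.0/run_tests.py | _update_meta_content_type_charset
-- ===== SOURCE A (Python) =====
-- def _update_meta_content_type_charset(content, encoding):
--     if content is None:
--         return None
--     if not encoding:
--         return content
--     s = str(content)
--     lower = s.lower()
--     idx = lower.find("charset=")
--     if idx == -1:
--         return s
--     start = idx + len("charset=")
--     end = start
--     while end < len(s) and s[end] not in {";", " ", "\t", "\r", "\n", "\f"}:
--         end += 1
--     return s[:start] + str(encoding) + s[end:]
-- ===== SOURCE B (Python) =====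
-- def _update_meta_content_type_charset(content, encoding):
--     if content is None:
--         return None
--     if not encoding:
--         return content
--     s = str(content)
--     before, sep, _ = s.lower().partition("charset=")
--     if not sep:
--         return s
--     start = len(before) + len(sep)
--     value = s[start:]
--     for d in "; \t\r\n\f":
--         value = value.partition(d)[0]
--     return s[:start] + str(encoding) + s[start + len(value):]
-- ===== Notes on version B (the rewrite author's own statement) =====
-- stated objective: idiomatic
-- what changed: B replaces A's manual lower().find('charset=') plus index-tracking while-loop character scan with str.partition to split around the marker and a fold of single-delimiter str.partition calls to cut the charset value at the first delimiter.
import Mathlib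
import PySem

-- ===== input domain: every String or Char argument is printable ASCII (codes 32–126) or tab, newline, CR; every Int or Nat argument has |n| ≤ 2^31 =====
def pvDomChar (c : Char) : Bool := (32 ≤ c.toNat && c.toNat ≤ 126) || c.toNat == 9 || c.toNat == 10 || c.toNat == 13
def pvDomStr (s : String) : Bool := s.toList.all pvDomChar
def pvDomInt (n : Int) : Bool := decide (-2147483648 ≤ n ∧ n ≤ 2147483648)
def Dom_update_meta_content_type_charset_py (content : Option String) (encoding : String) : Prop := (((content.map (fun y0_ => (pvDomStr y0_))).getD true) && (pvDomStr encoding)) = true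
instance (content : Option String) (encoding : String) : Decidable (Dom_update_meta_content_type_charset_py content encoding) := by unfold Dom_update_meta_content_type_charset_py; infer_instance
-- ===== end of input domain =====

-- B replaces A's manual lower().find + index while-loop with str.partition and a fold of
-- single-delimiter partitions (idiomatic; no claim of speed).

-- ===== PORT A =====
-- the `while end < len(s) and s[end] not in {...}` loop of A
def pvA_loop (s : List Char) (e : Nat) : Nat :=
  if h : e < s.length then
    if s[e] == ';' || s[e] == ' ' || s[e] == '\t' || s[e] == '\r' || s[e] == '\n' || s[e] == '\x0C' then e
    else pvA_loop s (e + 1)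
  else e
termination_by s.length - e

def update_meta_content_type_charset_py (content : Option String) (encoding : String) : Option String :=
  match content with
  | none => none
  | some c =>
    if encoding = "" then some c
    else
      let s := c.toList
      let lower := PySem.Chars.lower s
      let idx := PySem.Chars.find lower "charset=".toList
      if idx = -1 then some (String.ofList s)
      else
        let start := idx.toNat + "charset=".toList.length
        let e := pvA_loop s start
        some (String.ofList (PySem.List.slice s none (some (start : Int)) ++ encoding.toList
              ++ PySem.List.slice s (some (e : Int)) none))

-- ===== PORT B =====
-- Python str.partition(sub), hand-ported (exact: first occurrence via PySem.Chars.find, slices around it)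
def pvPartition (cs sub : List Char) : List Char × List Char × List Char :=
  let i := PySem.Chars.find cs sub
  if i = -1 then (cs, [], [])
  else (PySem.List.slice cs none (some i), sub, PySem.List.slice cs (some (i + sub.length)) none)

-- the `for d in "; \t\r\n\f": value = value.partition(d)[0]` loop of B
def pvB_trim (value : List Char) : List Char :=
  [';', ' ', '\t', '\r', '\n', '\x0C'].foldl (fun v d => (pvPartition v [d]).1) value

def update_meta_content_type_charset_py_alt (content : Option String) (encoding : String) : Option String :=
  match content with
  | none => none
  | some c =>
    if encoding = "" then some c
    else
      let s := c.toList
      let p := pvPartition (PySem.Chars.lower s) "charset=".toList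
      if p.2.1 = [] then some (String.ofList s)
      else
        let start := p.1.length + p.2.1.length
        let value := pvB_trim (PySem.List.slice s (some (start : Int)) none)
        some (String.ofList (PySem.List.slice s none (some (start : Int)) ++ encoding.toList
              ++ PySem.List.slice s (some ((start + value.length : Nat) : Int)) none))

-- ===== PRECONDITION & SPEC =====
def Spec_update_meta_content_type_charset_py (content : Option String) (encoding : String) (out : Option String) : Prop := out = update_meta_content_type_charset_py_alt content encoding
instance (content : Option String) (encoding : String) (out : Option String) : Decidable (Spec_update_meta_content_type_charset_py content encoding out) := by unfold Spec_update_meta_content_type_charset_py; infer_instance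

-- ===== CLAIM (what is proved, stated in full; the proofs are below) =====
def Claim_equal_update_meta_content_type_charset_py : Prop := ∀ (content : Option String) (encoding : String), Dom_update_meta_content_type_charset_py content encoding → Spec_update_meta_content_type_charset_py content encoding (update_meta_content_type_charset_py content encoding)

-- ===== LEMMAS AND PROOFS =====

def pvDelim (c : Char) : Bool :=
  c == ';' || c == ' ' || c == '\t' || c == '\r' || c == '\n' || c == '\x0C'

-- A's while-loop computes start + length of the non-delimiter prefix of the tail
theorem pvA_loop_eq (s : List Char) (e : Nat) :
    pvA_loop s e = e + ((s.drop e).takeWhile (fun c => !pvDelim c)).length := by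
  induction e using pvA_loop.induct s with
  | case1 e h hd =>
    rw [pvA_loop]
    simp only [h, dif_pos, if_pos hd]
    rw [List.drop_eq_getElem_cons h, List.takeWhile_cons]
    simp [pvDelim, hd]
  | case2 e h hd ih =>
    rw [pvA_loop]
    simp only [h, dif_pos, if_neg hd]
    have hf : pvDelim s[e] = false := by
      unfold pvDelim; exact Bool.eq_false_iff.mpr hd
    rw [ih, List.drop_eq_getElem_cons h, List.takeWhile_cons]
    simp [hf]
    omega
  | case3 e h =>
    rw [pvA_loop]
    simp [h, List.drop_eq_nil_of_le (Nat.le_of_not_lt h)]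

theorem take_eq_takeWhile (p : Char → Bool) (v : List Char) (n : Nat) (hn : n ≤ v.length)
    (hlt : ∀ j, (hj : j < n) → p (v[j]'(by omega)) = true)
    (hend : ∀ (h : n < v.length), p v[n] = false) :
    v.take n = v.takeWhile p := by
  induction v generalizing n with
  | nil => simp
  | cons a v ih =>
    cases n with
    | zero =>
      have := hend (by simp)
      simp only [List.getElem_cons_zero] at this
      simp [List.takeWhile_cons, this]
    | succ n =>
      have ha := hlt 0 (by omega)
      simp only [List.getElem_cons_zero] at ha
      simp only [List.take_succ_cons, List.takeWhile_cons, ha, if_pos]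
      rw [ih n (by simpa using hn) (fun j hj => by simpa using hlt (j+1) (by omega))
        (fun h => by simpa using hend (by simpa using Nat.succ_lt_succ h))]

theorem single_infix_iff (d : Char) (v : List Char) : [d] <:+: v ↔ d ∈ v := by
  constructor
  · rintro ⟨pre, suf, h⟩
    subst h; simp
  · intro h
    obtain ⟨pre, suf, rfl⟩ := List.mem_iff_append.mp h
    exact ⟨pre, suf, by simp⟩

theorem single_prefix_drop_iff (d : Char) (v : List Char) (j : Nat) :
    [d] <+: v.drop j ↔ v[j]? = some d := by
  constructor
  · rintro ⟨t, ht⟩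
    have h0 : (v.drop j)[0]? = some d := by rw [← ht]; simp
    simpa [List.getElem?_drop] using h0
  · intro h
    have hj : j < v.length := (List.getElem?_eq_some_iff.mp h).1
    have hv : v[j] = d := by
      have := List.getElem?_eq_getElem hj
      rw [this] at h; exact Option.some_injective _ h
    refine ⟨v.drop (j+1), ?_⟩
    rw [List.drop_eq_getElem_cons hj, hv]
    rfl

-- B's single-delimiter partition head is the prefix before the first d
theorem pvPartition_single (d : Char) (v : List Char) :
    (pvPartition v [d]).1 = v.takeWhile (fun c => c != d) := by
  unfold pvPartition
  by_cases h : PySem.Chars.find v [d] = -1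
  · simp only [h, if_pos rfl]
    have hmem : d ∉ v := fun hm =>
      (PySem.Chars.find_eq_neg_one_iff v [d]).mp h ((single_infix_iff d v).mpr hm)
    symm
    apply List.takeWhile_eq_self_iff.mpr
    intro a ha
    simp only [bne_iff_ne, ne_eq]
    rintro rfl; exact hmem ha
  · have h0 : 0 ≤ PySem.Chars.find v [d] := by
      have := PySem.Chars.neg_one_le_find v [d]; omega
    have hspec := PySem.Chars.find_spec (s := v) (sub := [d]) h0
    have hle : (PySem.Chars.find v [d]).toNat ≤ v.length := by
      have := PySem.Chars.find_le_length v [d]; omega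
    simp only [if_neg h]
    rw [PySem.List.slice_to v h0]
    apply take_eq_takeWhile
    · intro j hj
      have hnot := hspec.2 j hj
      rw [single_prefix_drop_iff] at hnot
      have hjlen : j < v.length := by omega
      simp only [List.getElem?_eq_getElem hjlen] at hnot
      simp only [bne_iff_ne, ne_eq]
      intro hc; exact hnot (by rw [hc])
    · intro hlt
      have := hspec.1
      rw [single_prefix_drop_iff, List.getElem?_eq_getElem hlt] at this
      simp [Option.some_injective _ this]
    · exact hle

theorem takeWhile_takeWhile' (p q : Char → Bool) (l : List Char) :
    (l.takeWhile p).takeWhile q = l.takeWhile (fun a => p a && q a) := by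
  induction l with
  | nil => rfl
  | cons a l ih =>
    by_cases hp : p a = true
    · by_cases hq : q a = true
      · simp [List.takeWhile_cons, hp, hq, ih]
      · simp [List.takeWhile_cons, hp, Bool.eq_false_iff.mpr hq]
    · simp [List.takeWhile_cons, Bool.eq_false_iff.mpr hp]

theorem pvB_trim_eq (v : List Char) :
    pvB_trim v = v.takeWhile (fun c => !pvDelim c) := by
  simp only [pvB_trim, List.foldl_cons, List.foldl_nil, pvPartition_single,
    takeWhile_takeWhile']
  congr 1
  funext c
  simp [pvDelim, bne, Bool.not_or, Bool.and_assoc]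

-- ===== VERDICT (by name: the statement is the Claim_ definition above) =====
theorem update_meta_content_type_charset_py_spec : Claim_equal_update_meta_content_type_charset_py := by
  intro content encoding _hdom
  unfold Spec_update_meta_content_type_charset_py
  unfold update_meta_content_type_charset_py update_meta_content_type_charset_py_alt
  cases content with
  | none => rfl
  | some c =>
    by_cases henc : encoding = ""
    · simp [henc]
    · simp only [if_neg henc]
      by_cases hidx : PySem.Chars.find (PySem.Chars.lower c.toList) "charset=".toList = -1
      · simp only [pvPartition, hidx, if_pos]
      · have h0 : 0 ≤ PySem.Chars.find (PySem.Chars.lower c.toList) "charset=".toList := by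
          have := PySem.Chars.neg_one_le_find (PySem.Chars.lower c.toList) "charset=".toList
          omega
        have hle : (PySem.Chars.find (PySem.Chars.lower c.toList) "charset=".toList).toNat
            ≤ (PySem.Chars.lower c.toList).length := by
          have := PySem.Chars.find_le_length (PySem.Chars.lower c.toList) "charset=".toList
          omega
        simp only [pvPartition, if_neg hidx]
        rw [PySem.List.slice_to (PySem.Chars.lower c.toList) h0]
        simp only [if_neg (by decide : ¬("charset=".toList = ([] : List Char)))]
        simp only [List.length_take, Nat.min_eq_left hle]
        rw [pvA_loop_eq, pvB_trim_eq]
        simp only [PySem.List.slice_from_natCast]
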